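-- pv_equiv track=rewrite | github.com/lgd1820/coding-test | programmers/lv2/파일명 정렬/test.py | solution
-- ===== SOURCE A (Python) =====
-- def solution(files):
--     answer = []
--     file = []
--     for i, file_name in enumerate(files):
--         head = ""
--         number = ""
--         tail = ""
--         for j, c in enumerate(file_name):
--             if not c.isnumeric():
--                 if not number:
--                     head += c
--                 else:
--                     tail = file_name[j:]
--                     break
--             else:
--                 number += c
--         file.append((head, number, tail, i))
--     answer = sorted(file, key=lambda x: (x[0].lower(), int(x[1]), x[3], x[2]))
--
--     return ["".join(x[:3]) for x in answer]
-- ===== SOURCE B (Python) =====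
-- def solution(files):
--     # head + number + tail == the filename itself, so sort the names directly,
--     # decorated with (lowercased head, numeric value, original index).
--     decorated = []
--     for i, name in enumerate(files):
--         k = 0
--         n = len(name)
--         while k < n and not name[k].isdecimal():
--             k += 1
--         m = k
--         while m < n and name[m].isdecimal():
--             m += 1
--         decorated.append((name[:k].lower(), int(name[k:m]), i, name))
--     decorated.sort()
--     return [t[3] for t in decorated]
-- ===== Notes on version B (the rewrite author's own statement) =====
-- stated objective: simpler
-- what changed: B replaces A's char-by-char accumulating parse (head/number/tail strings built in a loop with a break) and the re-join ''.join(x[:3]) by locating the two split indices of the first digit run and sorting the original filenames directly, decorated with (lowercased head, numeric value, index); the tail component of A's sort key is provably dead because the index is unique.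
import Mathlib
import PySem

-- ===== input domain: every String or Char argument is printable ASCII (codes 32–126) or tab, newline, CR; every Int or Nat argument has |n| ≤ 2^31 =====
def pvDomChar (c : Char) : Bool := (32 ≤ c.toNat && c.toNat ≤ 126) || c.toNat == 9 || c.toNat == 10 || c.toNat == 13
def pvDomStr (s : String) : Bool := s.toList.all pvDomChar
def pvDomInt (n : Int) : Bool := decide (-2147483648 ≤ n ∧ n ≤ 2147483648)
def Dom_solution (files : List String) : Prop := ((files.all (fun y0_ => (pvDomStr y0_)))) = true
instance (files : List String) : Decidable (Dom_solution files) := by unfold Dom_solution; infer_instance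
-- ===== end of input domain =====

-- B sorts the original filenames directly, decorated with (lowercased head, numeric value, index),
-- instead of A's char-accumulating parse-into-three-parts plus re-join; objective: simpler.

-- ===== PORT A =====
-- Python's 4-tuple comparison 'x < y' (lexicographic), in the style PySem.List.sorted2 uses for tuple keys.
def pvTupLt (x y : List Char × Int × Int × List Char) : Bool :=
  decide (x.1 < y.1) || (x.1 == y.1 && (decide (x.2.1 < y.2.1) || (x.2.1 == y.2.1 &&
    (decide (x.2.2.1 < y.2.2.1) || (x.2.2.1 == y.2.2.1 && decide (x.2.2.2 < y.2.2.2))))))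

-- A's inner 'for j, c in enumerate(file_name)' loop with its break; state = (head, number); tail = file_name[j:].
-- c.isnumeric() is ported as PySem.Chars.isdigit, exact on the printable-ASCII domain Dom_solution.
def pvParseA (orig : List Char) (j : Nat) (rest : List Char) (head number : List Char) :
    List Char × List Char × List Char :=
  match rest with
  | [] => (head, number, [])
  | c :: cs =>
    if !(PySem.Chars.isdigit c) then
      if number.isEmpty then
        pvParseA orig (j+1) cs (head ++ [c]) number
      else
        (head, number, PySem.List.slice orig (some ((j : Int))) none)  -- tail = file_name[j:]; break
    else
      pvParseA orig (j+1) cs head (number ++ [c])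

-- A's sort key lambda x: (x[0].lower(), int(x[1]), x[3], x[2]).
-- int(x[1]) raises ValueError when the number part is empty; Pre_solution excludes exactly those inputs, so the .getD 0 is never read.
def pvKeyA (x : List Char × List Char × List Char × Int) : List Char × Int × Int × List Char :=
  (PySem.Chars.lower x.1, (PySem.Int.ofChars? x.2.1).getD 0, x.2.2.2, x.2.2.1)

def solution (files : List String) : List String :=
  let file := (PySem.List.enumerate files).foldl (fun acc p =>
    let r := pvParseA p.2.toList 0 p.2.toList [] []
    acc ++ [(r.1, r.2.1, r.2.2, p.1)]) []
  -- sorted(file, key=...): Python's stable sort = the insertion-sort fold PySem.List.sorted is defined as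
  let answer := file.foldl (fun acc x =>
    PySem.List.insertBy (fun a b => pvTupLt (pvKeyA a) (pvKeyA b)) x acc) []
  answer.map (fun x => String.ofList (x.1 ++ x.2.1 ++ x.2.2.1))  -- "".join(x[:3])

-- ===== PORT B =====
-- while k < n and p(name[k]): k += 1   — ported as recursion on the not-yet-scanned suffix.
def pvSkip (p : Char → Bool) : List Char → Nat → Nat
  | [], k => k
  | c :: cs, k => if p c then pvSkip p cs (k+1) else k

def solution_alt (files : List String) : List String :=
  let decorated := (PySem.List.enumerate files).foldl (fun acc p =>
    let cs := p.2.toList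
    let k := pvSkip (fun c => !PySem.Chars.isdigit c) cs 0  -- .isdecimal() = isdigit on the ASCII domain
    let m := pvSkip PySem.Chars.isdigit (cs.drop k) k
    acc ++ [(PySem.Chars.lower (PySem.List.slice cs none (some (k : Int))),
             (PySem.Int.ofChars? (PySem.List.slice cs (some (k : Int)) (some (m : Int)))).getD 0,
             p.1, cs)]) []
  -- decorated.sort(): Python's stable tuple sort, the same insertion-sort fold
  let s := decorated.foldl (fun acc x => PySem.List.insertBy pvTupLt x acc) []
  s.map (fun t => String.ofList t.2.2.2)

-- ===== PRECONDITION & SPEC =====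
-- Pre_ excludes exactly the inputs with a filename containing no decimal digit, on which A's int("") raises ValueError (B raises there too).
def Pre_solution (files : List String) : Prop :=
  ∀ s ∈ files, s.toList.any PySem.Chars.isdigit = true
instance (files : List String) : Decidable (Pre_solution files) := by unfold Pre_solution; infer_instance

def pvWitness_solution : List String := ["img12.png", "img10.png", "IMG01.GIF", "1.txt"]

def Spec_solution (files : List String) (out : List String) : Prop := out = solution_alt files
instance (files : List String) (out : List String) : Decidable (Spec_solution files out) := by unfold Spec_solution; infer_instance

-- ===== CLAIM (what is proved, stated in full; the proofs are below) =====
def Claim_equal_solution : Prop := ∀ (files : List String), Dom_solution files → Pre_solution files → Spec_solution files (solution files)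

-- ===== LEMMAS AND PROOFS =====

-- the lexicographic order that pvTupLt decides (proof-side only; the ports use the Bool comparison)
def pvKeyLex (x : List Char × Int × Int × List Char) : List Char ×ₗ Int ×ₗ Int ×ₗ List Char :=
  toLex (x.1, toLex (x.2.1, toLex (x.2.2.1, x.2.2.2)))

theorem pvTupLt_eq (x y : List Char × Int × Int × List Char) :
    pvTupLt x y = decide (pvKeyLex x < pvKeyLex y) := by
  simp only [pvTupLt, pvKeyLex, Prod.Lex.lt_iff, ofLex_toLex]
  simp [Bool.decide_or, Bool.decide_and, Bool.beq_eq_decide_eq]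

-- the element A builds for (i, name), and the one B builds
def pvElemA (p : Int × String) : List Char × List Char × List Char × Int :=
  let r := pvParseA p.2.toList 0 p.2.toList [] []
  (r.1, r.2.1, r.2.2, p.1)

def pvElemB (p : Int × String) : List Char × Int × Int × List Char :=
  let cs := p.2.toList
  let k := pvSkip (fun c => !PySem.Chars.isdigit c) cs 0
  let m := pvSkip PySem.Chars.isdigit (cs.drop k) k
  (PySem.Chars.lower (PySem.List.slice cs none (some (k : Int))),
   (PySem.Int.ofChars? (PySem.List.slice cs (some (k : Int)) (some (m : Int)))).getD 0,
   p.1, cs)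

def pvJoin3 (x : List Char × List Char × List Char × Int) : List Char := x.1 ++ x.2.1 ++ x.2.2.1

def pvProj (x : List Char × List Char × List Char × Int) : List Char × Int × Int × List Char :=
  (PySem.Chars.lower x.1, (PySem.Int.ofChars? x.2.1).getD 0, x.2.2.2, pvJoin3 x)

theorem pvSkip_eq (p : Char → Bool) (l : List Char) (k : Nat) :
    pvSkip p l k = k + (l.takeWhile p).length := by
  induction l generalizing k with
  | nil => simp [pvSkip]
  | cons c cs ih =>
    by_cases h : p c
    · simp [pvSkip, h, List.takeWhile, ih]; omega
    · simp [pvSkip, h, List.takeWhile, ih]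

theorem pvDrop_succ_of_drop_cons {orig cs : List Char} {c : Char} {j : Nat}
    (h : orig.drop j = c :: cs) : orig.drop (j+1) = cs := by
  rw [← List.drop_drop, h]; simp

theorem pvParseA_phase2 (rest orig : List Char) (j : Nat) (head nb : List Char)
    (hnb : nb.isEmpty = false) (hrest : orig.drop j = rest) :
    pvParseA orig j rest head nb =
      (head, nb ++ rest.takeWhile PySem.Chars.isdigit,
       orig.drop (j + (rest.takeWhile PySem.Chars.isdigit).length)) := by
  induction rest generalizing j nb with
  | nil => simpa [pvParseA] using hrest.symm
  | cons c cs ih =>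
    by_cases h : PySem.Chars.isdigit c
    · rw [pvParseA]
      simp only [h, Bool.not_true, Bool.false_eq_true, if_false, List.takeWhile_cons]
      rw [ih (j+1) (nb ++ [c]) (by simp) (pvDrop_succ_of_drop_cons hrest)]
      simp
      omega
    · rw [pvParseA]
      simp only [h, Bool.not_false, if_true, hnb]
      simp [h, PySem.List.slice_from_natCast, hrest]

theorem pvParseA_phase1 (rest orig : List Char) (j : Nat) (head : List Char)
    (hrest : orig.drop j = rest) :
    pvParseA orig j rest head [] =
      (head ++ rest.takeWhile (fun c => !PySem.Chars.isdigit c),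
       (rest.dropWhile (fun c => !PySem.Chars.isdigit c)).takeWhile PySem.Chars.isdigit,
       orig.drop (j + (rest.takeWhile (fun c => !PySem.Chars.isdigit c)).length +
         ((rest.dropWhile (fun c => !PySem.Chars.isdigit c)).takeWhile PySem.Chars.isdigit).length)) := by
  induction rest generalizing j head with
  | nil => simpa [pvParseA] using hrest.symm
  | cons c cs ih =>
    by_cases h : PySem.Chars.isdigit c
    · rw [pvParseA]
      simp only [h, Bool.not_true, Bool.false_eq_true, if_false, List.isEmpty_nil, List.nil_append]
      rw [pvParseA_phase2 cs orig (j+1) head [c] (by simp) (pvDrop_succ_of_drop_cons hrest)]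
      simp [h]
      omega
    · rw [pvParseA]
      simp only [h, Bool.not_false, if_true, List.isEmpty_nil]
      rw [ih (j+1) (head ++ [c]) (pvDrop_succ_of_drop_cons hrest)]
      simp [h]
      omega

theorem pvDrop_takeWhile_length (p : Char → Bool) (l : List Char) :
    l.drop (l.takeWhile p).length = l.dropWhile p := by
  induction l with
  | nil => simp
  | cons c cs ih => by_cases h : p c <;> simp [List.takeWhile, List.dropWhile, h, ih]

theorem pvTake_takeWhile_length (p : Char → Bool) (l : List Char) :
    l.take (l.takeWhile p).length = l.takeWhile p := by
  induction l with
  | nil => simp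
  | cons c cs ih => by_cases h : p c <;> simp [List.takeWhile, h, ih]

theorem pvParseA_top (cs : List Char) :
    pvParseA cs 0 cs [] [] =
      (cs.takeWhile (fun c => !PySem.Chars.isdigit c),
       (cs.dropWhile (fun c => !PySem.Chars.isdigit c)).takeWhile PySem.Chars.isdigit,
       (cs.dropWhile (fun c => !PySem.Chars.isdigit c)).dropWhile PySem.Chars.isdigit) := by
  rw [pvParseA_phase1 cs cs 0 [] (by simp)]
  simp only [List.nil_append, Nat.zero_add]
  rw [← List.drop_drop, pvDrop_takeWhile_length, pvDrop_takeWhile_length]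

-- joining A's three parts gives back the filename
theorem pvJoin3_elemA (p : Int × String) : pvJoin3 (pvElemA p) = p.2.toList := by
  simp only [pvElemA, pvJoin3, pvParseA_top]
  rw [List.append_assoc, List.takeWhile_append_dropWhile, List.takeWhile_append_dropWhile]

-- B's element is the projection of A's element
theorem pvElemB_eq_proj (p : Int × String) : pvElemB p = pvProj (pvElemA p) := by
  have hj := pvJoin3_elemA p
  simp only [pvElemA, pvParseA_top] at hj
  simp only [pvElemB, pvProj, pvElemA, pvParseA_top, pvSkip_eq, Nat.zero_add]
  rw [pvDrop_takeWhile_length, PySem.List.slice_to_natCast, pvTake_takeWhile_length,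
    PySem.List.slice_natCast, Nat.add_sub_cancel_left, pvDrop_takeWhile_length,
    pvTake_takeWhile_length, hj]

-- ≤ on A's keys together with distinct indices gives < on B's tuples (they share the first three components)
theorem pvLex_step (x y : List Char × List Char × List Char × Int)
    (hle : pvKeyLex (pvKeyA x) ≤ pvKeyLex (pvKeyA y)) (hne : x.2.2.2 ≠ y.2.2.2) :
    pvKeyLex (pvProj x) < pvKeyLex (pvProj y) := by
  simp only [pvKeyA, pvProj, pvKeyLex, Prod.Lex.le_iff, Prod.Lex.lt_iff, ofLex_toLex] at *
  rcases hle with h | ⟨h1, h | ⟨h2, h | ⟨h3, _⟩⟩⟩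
  · exact Or.inl h
  · exact Or.inr ⟨h1, Or.inl h⟩
  · exact Or.inr ⟨h1, Or.inr ⟨h2, Or.inl h⟩⟩
  · exact absurd h3 hne

-- the two ports, rewritten as PySem.List.sorted of mapped element lists
theorem pvSolutionA_eq (files : List String) :
    solution files =
      (PySem.List.sorted ((PySem.List.enumerate files).map pvElemA)
        (fun x => pvKeyLex (pvKeyA x)) false).map (fun x => String.ofList (x.1 ++ x.2.1 ++ x.2.2.1)) := by
  unfold solution
  rw [show (fun (acc : List (List Char × List Char × List Char × Int)) (p : Int × String) =>
      let r := pvParseA p.2.toList 0 p.2.toList [] []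
      acc ++ [(r.1, r.2.1, r.2.2, p.1)]) = fun acc p => acc ++ [pvElemA p] from rfl]
  rw [PySem.List.foldl_append_singleton_eq_map pvElemA _ []]
  rw [PySem.List.sorted_eq_foldl_insertBy _ (fun x => pvKeyLex (pvKeyA x))]
  simp only [pvTupLt_eq, List.nil_append]

theorem pvSolutionB_eq (files : List String) :
    solution_alt files =
      (PySem.List.sorted ((PySem.List.enumerate files).map pvElemB) pvKeyLex false).map
        (fun t => String.ofList t.2.2.2) := by
  unfold solution_alt
  rw [show (fun (acc : List (List Char × Int × Int × List Char)) (p : Int × String) =>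
      let cs := p.2.toList
      let k := pvSkip (fun c => !PySem.Chars.isdigit c) cs 0
      let m := pvSkip PySem.Chars.isdigit (cs.drop k) k
      acc ++ [(PySem.Chars.lower (PySem.List.slice cs none (some (k : Int))),
               (PySem.Int.ofChars? (PySem.List.slice cs (some (k : Int)) (some (m : Int)))).getD 0,
               p.1, cs)]) = fun acc p => acc ++ [pvElemB p] from rfl]
  rw [PySem.List.foldl_append_singleton_eq_map pvElemB _ []]
  rw [PySem.List.sorted_eq_foldl_insertBy _ pvKeyLex]
  rw [show pvTupLt = fun a b => decide (pvKeyLex a < pvKeyLex b) from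
    funext fun a => funext fun b => pvTupLt_eq a b]
  simp only [List.nil_append]

-- ===== VERDICT (by name: the statement is the Claim_ definition above) =====
theorem solution_spec : Claim_equal_solution := by
  intro files _ _
  unfold Spec_solution
  rw [pvSolutionA_eq, pvSolutionB_eq]
  set L := (PySem.List.enumerate files).map pvElemA with hL
  set ys := PySem.List.sorted L (fun x => pvKeyLex (pvKeyA x)) false with hys
  have h1 : ys.Pairwise (fun a b => pvKeyLex (pvKeyA a) ≤ pvKeyLex (pvKeyA b)) :=
    PySem.List.sorted_pairwise L (fun x => pvKeyLex (pvKeyA x))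
  have hLpw : L.Pairwise (fun a b => a.2.2.2 ≠ b.2.2.2) := by
    have := PySem.List.pairwise_lt_enumerate files 0
    rw [List.pairwise_map]
    exact (this.imp (fun h => ne_of_lt h))
  have h2 : ys.Pairwise (fun a b => a.2.2.2 ≠ b.2.2.2) := by
    have hperm : ys.Perm L := PySem.List.sorted_perm L (fun x => pvKeyLex (pvKeyA x)) false
    exact ((hperm.pairwise_iff (fun h => Ne.symm h)).mpr hLpw)
  have h3 : (ys.map pvProj).Pairwise (fun a b => pvKeyLex a < pvKeyLex b) := by
    rw [List.pairwise_map]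
    exact (h1.and h2).imp (fun h => pvLex_step _ _ h.1 h.2)
  have h4 : (ys.map pvProj).Perm ((PySem.List.enumerate files).map pvElemB) := by
    have : (PySem.List.enumerate files).map pvElemB = L.map pvProj := by
      rw [hL, List.map_map]
      exact List.map_congr_left (fun p _ => by rw [Function.comp_apply, pvElemB_eq_proj])
    rw [this]
    exact (PySem.List.sorted_perm L (fun x => pvKeyLex (pvKeyA x)) false).map pvProj
  rw [PySem.List.sorted_eq_of_perm_of_pairwise_lt _ _ _ h4 h3]
  rw [List.map_map]
  exact List.map_congr_left (fun x _ => by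
    simp [Function.comp_apply, pvProj, pvJoin3])
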